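-- pv_equiv track=rewrite | github.com/Sazid99246/gfg-nation-skillup | DSA/Week 1/local_mean_and_max_sequence_ordering.py | extractPoints
-- ===== SOURCE A (Python) =====
-- def extractPoints(arr):
--     if not arr:
--         return []
--     if len(arr) == 1:
--         return [arr[0]]
--
--     n = len(arr)
--     result = [arr[0]]
--
--     i = 1
--
--     while i < n and arr[i] == arr[i - 1]:
--         i += 1
--
--         if i == n:
--             return result
--
--     prev_dir = 1 if arr[i] > arr[i - 1] else -1
--
--     for j in range(i + 1, n):
--         if arr[j] == arr[j - 1]:
--             continue
--
--         curr_dir = 1 if arr[j] > arr[j - 1] else -1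
--         if curr_dir != prev_dir:
--             result.append(arr[j - 1])
--             prev_dir = curr_dir
--
--     if result[-1] != arr[-1]:
--         result.append(arr[-1])
--
--     return result
-- ===== SOURCE B (Python) =====
-- def extractPoints(arr):
--     # Compress runs of equal adjacent values, then pick endpoints plus
--     # interior local extrema of the compressed list by triple comparison.
--     s = []
--     for x in arr:
--         if not s or x != s[-1]:
--             s.append(x)
--     if not s:
--         return []
--     if len(s) == 1:
--         return [s[0]]
--     res = [s[0]]
--     for x, y, z in zip(s, s[1:], s[2:]):
--         if x < y > z or x > y < z:
--             res.append(y)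
--     res.append(s[-1])
--     return res
-- ===== Notes on version B (the rewrite author's own statement) =====
-- stated objective: alternative
-- what changed: Replaces A's direction-state machine (while-skip prologue plus prev_dir tracking with early return) by a two-phase pass: first compress adjacent-equal runs, then select endpoints and interior local extrema of the compressed list by triple comparisons.
import Mathlib
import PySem

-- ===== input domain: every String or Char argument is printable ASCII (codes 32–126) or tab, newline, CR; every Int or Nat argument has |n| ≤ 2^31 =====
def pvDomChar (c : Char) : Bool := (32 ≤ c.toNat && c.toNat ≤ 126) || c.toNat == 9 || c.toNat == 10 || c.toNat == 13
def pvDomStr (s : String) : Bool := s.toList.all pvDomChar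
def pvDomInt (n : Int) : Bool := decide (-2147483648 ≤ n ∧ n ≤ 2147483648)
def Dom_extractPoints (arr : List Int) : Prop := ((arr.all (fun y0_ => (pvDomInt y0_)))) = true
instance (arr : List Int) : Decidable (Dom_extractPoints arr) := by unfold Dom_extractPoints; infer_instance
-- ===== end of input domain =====

-- B differs from A structurally only (compress-then-triple-scan instead of A's direction-state machine); same value on every input.

-- ===== PORT A =====
-- A's for-loop over j = i+1..n-1: structural recursion over the suffix,
-- carrying arr[j-1] as `prev`, prev_dir as `d`, result as `res` (same state,
-- same branch order: skip equal, compute curr_dir, append arr[j-1] on change).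
def aLoop (d : Int) (prev : Int) (l : List Int) (res : List Int) : List Int :=
  match l with
  | [] => res
  | x :: t =>
    if x = prev then aLoop d prev t res              -- arr[j] == arr[j-1]: continue
    else
      let cd : Int := if x > prev then 1 else -1     -- curr_dir
      if cd ≠ d then aLoop cd x t (res ++ [prev])    -- result.append(arr[j-1]); prev_dir = curr_dir
      else aLoop d x t res

-- A's while-loop: advance i past the leading run of arr[0]; `none` encodes the
-- early `return result` when i reaches n; otherwise set prev_dir and run the for-loop.
def aSkip (a : Int) (l : List Int) : Option (List Int) :=
  match l with
  | [] => none
  | x :: t =>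
    if x = a then aSkip a t
    else some (aLoop (if x > a then 1 else -1) x t [a])

def extractPoints (arr : List Int) : List Int :=
  match arr with
  | [] => []                                         -- if not arr: return []
  | [a] => [a]                                       -- if len(arr) == 1
  | a :: rest =>
    match aSkip a rest with
    | none => [a]                                    -- while exhausted i == n: return result (= [arr[0]])
    | some res =>
      let lastv := arr.getLast!                      -- arr[-1]
      if res.getLast! ≠ lastv then res ++ [lastv] else res

-- ===== PORT B =====
-- Source B's dedup loop: s.append(x) unless s is nonempty and x equals s[-1]
def bStep (s : List Int) (x : Int) : List Int :=
  if s = [] ∨ x ≠ s.getLast! then s ++ [x] else s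

-- Source B's `for x, y, z in zip(s, s[1:], s[2:])`: the y's appended to res
def bTriples (l : List Int) : List Int :=
  match l with
  | x :: y :: z :: t =>
    (if (x < y ∧ y > z) ∨ (x > y ∧ y < z) then [y] else []) ++ bTriples (y :: z :: t)
  | _ => []

def extractPoints_alt (arr : List Int) : List Int :=
  let s := arr.foldl bStep []
  if s = [] then []                                  -- if not s: return []
  else if s.length = 1 then [s.headI]                -- if len(s) == 1: return [s[0]]
  else [s.headI] ++ bTriples s ++ [s.getLast!]

-- ===== PRECONDITION & SPEC =====
def Spec_extractPoints (arr : List Int) (out : List Int) : Prop := out = extractPoints_alt arr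
instance (arr : List Int) (out : List Int) : Decidable (Spec_extractPoints arr out) := by unfold Spec_extractPoints; infer_instance

-- ===== CLAIM (what is proved, stated in full; the proofs are below) =====
def Claim_equal_extractPoints : Prop := ∀ (arr : List Int), Dom_extractPoints arr → Spec_extractPoints arr (extractPoints arr)

-- ===== LEMMAS AND PROOFS =====

theorem last_concat (l : List Int) (x : Int) : (l ++ [x]).getLast! = x := by
  simp [List.getLast!_eq_getLast?_getD]

theorem last_cc (a b : Int) (l : List Int) : (a :: b :: l).getLast! = (b :: l).getLast! := by
  simp [List.getLast!_eq_getLast?_getD, List.getLast?_cons_cons]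

-- Recursive form of B's dedup fold: t with runs of the carried previous value removed.
def ddFrom (p : Int) : List Int → List Int
  | [] => []
  | x :: t => if x = p then ddFrom p t else x :: ddFrom x t

theorem foldl_bStep (t : List Int) : ∀ (acc : List Int), acc ≠ [] →
    t.foldl bStep acc = acc ++ ddFrom acc.getLast! t := by
  induction t with
  | nil => intro acc _; simp [ddFrom]
  | cons x t ih =>
    intro acc h
    rw [List.foldl_cons]
    by_cases hx : x = acc.getLast!
    · have hs : bStep acc x = acc := by
        rw [bStep, if_neg]; rw [not_or, not_not]; exact ⟨h, hx⟩
      rw [hs, ih acc h, show ddFrom acc.getLast! (x :: t) = ddFrom acc.getLast! t from by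
        simp only [ddFrom, if_pos hx]]
    · have hs : bStep acc x = acc ++ [x] := by rw [bStep, if_pos (Or.inr hx)]
      rw [hs, ih _ (by simp), last_concat,
        show ddFrom acc.getLast! (x :: t) = x :: ddFrom x t from by simp only [ddFrom, if_neg hx]]
      simp

theorem ddFrom_getLast (t : List Int) : ∀ p, (p :: ddFrom p t).getLast! = (p :: t).getLast! := by
  induction t with
  | nil => intro p; rfl
  | cons x t ih =>
    intro p
    by_cases hx : x = p
    · rw [show ddFrom p (x :: t) = ddFrom p t from by simp [ddFrom, hx], ih p, last_cc]
      rcases t with _ | ⟨y, u⟩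
      · simp [List.getLast!_eq_getLast?_getD, hx]
      · exact (last_cc x y u).symm
    · rw [show ddFrom p (x :: t) = x :: ddFrom x t from by simp [ddFrom, hx],
        last_cc, last_cc, ih x]

-- aLoop ignores elements equal to the carried prev: running it on the raw
-- suffix equals running it on the deduped suffix.
theorem aLoop_dedup (l : List Int) : ∀ (d p : Int) (res : List Int),
    aLoop d p l res = aLoop d p (ddFrom p l) res := by
  induction l with
  | nil => intro d p res; simp [ddFrom]
  | cons x t ih =>
    intro d p res
    by_cases hx : x = p
    · simp [aLoop, ddFrom, hx, ih]
    · by_cases hcd : (if x > p then (1:Int) else -1) ≠ d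
      · simp [aLoop, ddFrom, hx, hcd, ih]
      · simp [aLoop, ddFrom, hx, hcd, ih]

-- "adjacent-distinct starting from p", the shape ddFrom produces
def AD : Int → List Int → Prop
  | _, [] => True
  | p, x :: t => x ≠ p ∧ AD x t

theorem AD_ddFrom (t : List Int) : ∀ p, AD p (ddFrom p t) := by
  induction t with
  | nil => intro p; trivial
  | cons x t ih =>
    intro p
    by_cases hx : x = p
    · simpa [ddFrom, hx] using ih p
    · simp only [ddFrom, if_neg hx]; exact ⟨hx, ih x⟩

-- Main invariant: on an adjacent-distinct list, A's direction-change scan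
-- collects exactly the interior local extrema (B's triple scan), and its
-- result never ends with the last element of the list.
theorem aLoop_main (l : List Int) : ∀ (pb b d : Int) (res : List Int),
    AD b l →
    ((d = 1 ∧ pb < b) ∨ (d = -1 ∧ pb > b)) →
    res ≠ [] →
    (d = 1 → res.getLast! < b) → (d = -1 → b < res.getLast!) →
    aLoop d b l res = res ++ bTriples (pb :: b :: l) ∧
      (aLoop d b l res).getLast! ≠ (b :: l).getLast! := by
  induction l with
  | nil =>
    intro pb b d res _ hd _ h1 h2
    refine ⟨by simp [aLoop, bTriples], ?_⟩
    show res.getLast! ≠ [b].getLast!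
    have hb : ([b] : List Int).getLast! = b := rfl
    rw [hb]
    rcases hd with ⟨hd, _⟩ | ⟨hd, _⟩
    · have := h1 hd; omega
    · have := h2 hd; omega
  | cons c t ih =>
    intro pb b d res hAD hd hres h1 h2
    obtain ⟨hcb, hADt⟩ := hAD
    set cd : Int := if c > b then 1 else -1 with hcddef
    have hcd2 : (cd = 1 ∧ b < c) ∨ (cd = -1 ∧ b > c) := by
      rcases lt_trichotomy b c with h | h | h
      · left; exact ⟨by rw [hcddef, if_pos (show c > b from h)], h⟩
      · exact absurd h.symm hcb
      · right; exact ⟨by rw [hcddef, if_neg (show ¬ c > b from by omega)], h⟩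
    by_cases hchg : cd ≠ d
    · -- direction change: b is an extremum, it is appended
      have hstep : aLoop d b (c :: t) res = aLoop cd c t (res ++ [b]) := by
        simp [aLoop, hcb, ← hcddef, hchg]
      have hlastb : (res ++ [b]).getLast! = b := last_concat res b
      have hext : bTriples (pb :: b :: c :: t) = [b] ++ bTriples (b :: c :: t) := by
        rcases hd with ⟨hd1, hlt⟩ | ⟨hd1, hgt⟩
        · have hnc : ¬ c > b := by
            intro h; exact hchg (by rw [hcddef, if_pos h, hd1])
          simp only [bTriples]
          rw [if_pos (Or.inl ⟨hlt, show b > c from by omega⟩)]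
        · have hc : c > b := by
            by_contra h; exact hchg (by rw [hcddef, if_neg h, hd1])
          simp only [bTriples]
          rw [if_pos (Or.inr ⟨hgt, show b < c from hc⟩)]
      obtain ⟨ihl, ihr⟩ := ih b c cd (res ++ [b]) hADt hcd2 (by simp)
        (fun h => by rw [hlastb]; rcases hcd2 with ⟨_, h2⟩ | ⟨h1, _⟩; exacts [h2, by omega])
        (fun h => by rw [hlastb]; rcases hcd2 with ⟨h1, _⟩ | ⟨_, h2⟩; exacts [by omega, h2])
      refine ⟨?_, ?_⟩
      · rw [hstep, ihl, hext]; simp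
      · rw [hstep, last_cc]; exact ihr
    · -- same direction: b is not an extremum
      rw [not_not] at hchg
      have hstep : aLoop d b (c :: t) res = aLoop cd c t res := by
        simp [aLoop, hcb, ← hcddef, hchg]
      have hnoext : bTriples (pb :: b :: c :: t) = bTriples (b :: c :: t) := by
        rcases hd with ⟨hd1, hlt⟩ | ⟨hd1, hgt⟩
        · have hbc : c > b := by
            by_contra h
            have : cd = -1 := by rw [hcddef, if_neg h]
            omega
          simp only [bTriples]; rw [if_neg (by omega)]; simp
        · have hbc : ¬ c > b := by
            intro h
            have : cd = 1 := by rw [hcddef, if_pos h]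
            omega
          simp only [bTriples]; rw [if_neg (by omega)]; simp
      obtain ⟨ihl, ihr⟩ := ih b c cd res hADt hcd2 hres
        (fun h => by
          rcases hcd2 with ⟨_, hbc⟩ | ⟨hm, _⟩
          · have := h1 (by omega); omega
          · omega)
        (fun h => by
          rcases hcd2 with ⟨hm, _⟩ | ⟨_, hbc⟩
          · omega
          · have := h2 (by omega); omega)
      refine ⟨?_, ?_⟩
      · rw [hstep, ihl, hnoext]
      · rw [hstep, last_cc]; exact ihr

-- aSkip characterized through ddFrom
theorem aSkip_none (l : List Int) : ∀ a, ddFrom a l = [] → aSkip a l = none := by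
  induction l with
  | nil => intro a _; rfl
  | cons x t ih =>
    intro a h
    by_cases hx : x = a
    · simp [ddFrom, hx] at h; simp [aSkip, hx]; exact ih a h
    · simp [ddFrom, hx] at h
  
theorem aSkip_some (l : List Int) : ∀ a b u, ddFrom a l = b :: u →
    aSkip a l = some (aLoop (if b > a then 1 else -1) b u [a]) := by
  induction l with
  | nil => intro a b u h; simp [ddFrom] at h
  | cons x t ih =>
    intro a b u h
    by_cases hx : x = a
    · simp [ddFrom, hx] at h; simp [aSkip, hx]; exact ih a b u h
    · simp only [ddFrom, if_neg hx, List.cons.injEq] at h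
      obtain ⟨hb, hu⟩ := h
      subst hb
      rw [aSkip, if_neg hx, aLoop_dedup, hu]

theorem extractPoints_spec_aux (arr : List Int) : extractPoints arr = extractPoints_alt arr := by
  rcases arr with _ | ⟨a, rest⟩
  · rfl
  have hfold : (a :: rest).foldl bStep [] = a :: ddFrom a rest := by
    have h1 : bStep [] a = [a] := by rw [bStep, if_pos (Or.inl rfl)]; rfl
    have h2 := foldl_bStep rest [a] (by simp)
    rw [List.foldl_cons, h1, h2]
    rfl
  rcases hdd : ddFrom a rest with _ | ⟨b, u⟩
  · -- every element of rest equals a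
    rcases rest with _ | ⟨x, t⟩
    · have h1 : bStep [] a = [a] := by rw [bStep, if_pos (Or.inl rfl)]; rfl
      simp [extractPoints, extractPoints_alt, h1]
    · simp [extractPoints, aSkip_none _ a hdd, extractPoints_alt, hfold, hdd]
  · -- at least two distinct values in arr
    have hba : b ≠ a ∧ AD b u := by have := AD_ddFrom rest a; rw [hdd] at this; exact this
    have hrest : rest ≠ [] := by intro h; subst h; simp [ddFrom] at hdd
    have hlastv : (b :: u).getLast! = (a :: rest).getLast! := by
      have h1 := ddFrom_getLast rest a
      rw [hdd, last_cc] at h1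
      exact h1
    set d0 : Int := if b > a then 1 else -1 with hd0
    have hd : (d0 = 1 ∧ a < b) ∨ (d0 = -1 ∧ a > b) := by
      rcases lt_trichotomy a b with h | h | h
      · left; exact ⟨by rw [hd0, if_pos (show b > a from h)], h⟩
      · exact absurd h.symm hba.1
      · right; exact ⟨by rw [hd0, if_neg (show ¬ b > a from by omega)], h⟩
    have hsa : ([a] : List Int).getLast! = a := rfl
    obtain ⟨hmain, hlast⟩ := aLoop_main u a b d0 [a] hba.2 hd (by simp)
      (fun h => by rw [hsa]; rcases hd with ⟨_, h2⟩ | ⟨h1, _⟩; exacts [h2, by omega])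
      (fun h => by rw [hsa]; rcases hd with ⟨h1, _⟩ | ⟨_, h2⟩; exacts [by omega, h2])
    rcases rest with _ | ⟨x, t⟩
    · exact absurd rfl hrest
    rw [hlastv] at hlast
    have hA : extractPoints (a :: x :: t) =
        (if (aLoop d0 b u [a]).getLast! ≠ (a :: x :: t).getLast!
         then aLoop d0 b u [a] ++ [(a :: x :: t).getLast!] else aLoop d0 b u [a]) := by
      simp only [extractPoints, aSkip_some _ a b u hdd, ← hd0]
    rw [hA, if_pos hlast, hmain]
    have hB : extractPoints_alt (a :: x :: t) =
        [a] ++ bTriples (a :: b :: u) ++ [(a :: b :: u).getLast!] := by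
      simp only [extractPoints_alt, hfold, hdd]
      rw [if_neg (by simp), if_neg (by simp)]
      rfl
    rw [hB, last_cc a b u, hlastv]

-- ===== VERDICT (by name: the statement is the Claim_ definition above) =====
theorem extractPoints_spec : Claim_equal_extractPoints := by
  intro arr _
  unfold Spec_extractPoints
  exact extractPoints_spec_aux arr
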